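-- pv_equiv track=rewrite | github.com/pypi-data/pypi-mirror-352 | packages/get-oblique/get_oblique-0.1.1-py3-none-any.whl/GET/treeFunc.py | getBranchNodes
-- ===== SOURCE A (Python) =====
-- def getBranchNodes(ind, prelayer):
--     ind -= 1
--     branchNodes = [ind]
--     currentNodes = [ind]
--     for _ in range(prelayer-1):
--         nextNodes = [2*node + j for node in currentNodes for j in [1, 2]]
--         branchNodes.extend(nextNodes)
--         currentNodes = nextNodes
--     return branchNodes
-- ===== SOURCE B (Python) =====
-- def getBranchNodes(ind, prelayer):
--     result = []
--     for k in range(max(prelayer, 1)):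
--         p = 2 ** k
--         base = p * (ind - 1) + (p - 1)
--         result.extend(base + j for j in range(p))
--     return result
-- ===== Notes on version B (the rewrite author's own statement) =====
-- stated objective: alternative
-- what changed: B computes each layer's node indices directly from a closed form (base = 2^k*(ind-1) + 2^k - 1, plus offsets 0..2^k-1) instead of A's iterative doubling that derives each layer from the previous layer it keeps around.
import Mathlib
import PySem

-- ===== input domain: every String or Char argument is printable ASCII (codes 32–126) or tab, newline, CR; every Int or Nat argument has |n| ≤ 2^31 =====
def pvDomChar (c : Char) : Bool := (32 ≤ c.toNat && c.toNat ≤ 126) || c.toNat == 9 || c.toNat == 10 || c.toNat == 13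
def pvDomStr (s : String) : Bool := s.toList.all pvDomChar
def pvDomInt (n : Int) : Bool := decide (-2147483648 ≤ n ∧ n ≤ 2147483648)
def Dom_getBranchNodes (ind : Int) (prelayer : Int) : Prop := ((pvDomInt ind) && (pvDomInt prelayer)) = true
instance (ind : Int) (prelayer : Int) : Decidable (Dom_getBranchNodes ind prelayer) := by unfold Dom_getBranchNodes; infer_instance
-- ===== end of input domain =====

-- ===== PORT A =====
-- Port of A: iterative doubling — each iteration derives the next layer from the previous one.
def getBranchNodes (ind : Int) (prelayer : Int) : List Int :=
  let ind1 := ind - 1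
  let st := (PySem.List.pyRange 0 (prelayer - 1) 1).foldl
    (fun (st : List Int × List Int) _ =>
      let nextNodes := st.2.flatMap (fun node => [(1 : Int), (2 : Int)].map (fun j => 2 * node + j))
      (st.1 ++ nextNodes, nextNodes))
    ([ind1], [ind1])
  st.1

-- ===== PORT B =====
-- Port of B: each layer's indices computed by a closed form, no previous layer kept.
def getBranchNodes_alt (ind : Int) (prelayer : Int) : List Int :=
  (PySem.List.pyRange 0 (max prelayer 1) 1).foldl
    (fun (result : List Int) k =>
      let p : Int := 2 ^ k.toNat
      let base := p * (ind - 1) + (p - 1)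
      result ++ (PySem.List.pyRange 0 p 1).map (fun j => base + j))
    []

-- ===== PRECONDITION & SPEC =====
def Spec_getBranchNodes (ind : Int) (prelayer : Int) (out : List Int) : Prop := out = getBranchNodes_alt ind prelayer
instance (ind : Int) (prelayer : Int) (out : List Int) : Decidable (Spec_getBranchNodes ind prelayer out) := by unfold Spec_getBranchNodes; infer_instance

-- ===== CLAIM (what is proved, stated in full; the proofs are below) =====
def Claim_equal_getBranchNodes : Prop := ∀ (ind : Int) (prelayer : Int), Dom_getBranchNodes ind prelayer → Spec_getBranchNodes ind prelayer (getBranchNodes ind prelayer)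

-- ===== LEMMAS AND PROOFS =====

-- layer k of the tree rooted at index m (0-based): 2^k consecutive indices starting at 2^k*m + 2^k - 1
def pvLayer (m : Int) (k : Nat) : List Int :=
  (List.range (2 ^ k)).map (fun (j : Nat) => (2 ^ k : Int) * m + ((2 ^ k : Int) - 1) + (j : Int))

theorem pvDouble (a : Int) (n : Nat) :
    (List.range n).flatMap (fun (q : Nat) => [a + 2 * (q : Int), a + 2 * (q : Int) + 1])
      = (List.range (2 * n)).map (fun (i : Nat) => a + (i : Int)) := by
  induction n with
  | zero => simp
  | succ n ih =>
    rw [List.range_succ, List.flatMap_append, ih]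
    have h2 : 2 * (n + 1) = (2 * n + 1) + 1 := by ring
    rw [h2, List.range_succ, List.range_succ]
    simp only [List.map_append, List.map_cons, List.map_nil, List.flatMap_cons,
      List.flatMap_nil, List.append_nil, List.append_assoc]
    push_cast
    ring_nf
    simp

theorem pvLayer_step (m : Int) (k : Nat) :
    (pvLayer m k).flatMap (fun node => [(1 : Int), (2 : Int)].map (fun j => 2 * node + j))
      = pvLayer m (k + 1) := by
  unfold pvLayer
  rw [List.flatMap_map]
  have hfun : (fun (a : Nat) => List.map (fun j => 2 * ((2 ^ k : Int) * m + ((2 ^ k : Int) - 1) + (a : Int)) + j) [(1 : Int), (2 : Int)])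
      = (fun (q : Nat) => [((2 ^ (k+1) : Int) * m + ((2 ^ (k+1) : Int) - 1)) + 2 * (q : Int),
          ((2 ^ (k+1) : Int) * m + ((2 ^ (k+1) : Int) - 1)) + 2 * (q : Int) + 1]) := by
    funext q
    simp only [List.map_cons, List.map_nil, List.cons.injEq, and_true]
    refine ⟨by ring, by ring⟩
  rw [hfun, pvDouble]
  have h2 : 2 * 2 ^ k = 2 ^ (k + 1) := by rw [pow_succ]; ring
  rw [h2]

theorem pvA_loop {α : Type} (m : Int) (l : List α) :
    l.foldl
      (fun (st : List Int × List Int) _ =>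
        let nextNodes := st.2.flatMap (fun node => [(1 : Int), (2 : Int)].map (fun j => 2 * node + j))
        (st.1 ++ nextNodes, nextNodes))
      ([m], [m])
    = ((List.range (l.length + 1)).flatMap (pvLayer m), pvLayer m l.length) := by
  induction l using List.reverseRecOn with
  | nil => simp [pvLayer]
  | append_singleton l x ih =>
    rw [List.foldl_append, ih]
    simp only [List.foldl_cons, List.foldl_nil]
    rw [pvLayer_step]
    rw [List.length_append, List.length_singleton]
    rw [List.range_succ (n := l.length + 1), List.flatMap_append]
    simp

theorem pvB_block (ind : Int) (k : Nat) :
    ((PySem.List.pyRange 0 ((2 : Int) ^ k) 1).map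
        (fun j => ((2 : Int) ^ k) * (ind - 1) + (((2 : Int) ^ k) - 1) + j))
      = pvLayer (ind - 1) k := by
  rw [PySem.List.pyRange_one, List.map_map]
  unfold pvLayer
  have ht : (((2 : Int) ^ k - 0).toNat) = 2 ^ k := by
    rw [sub_zero, show ((2 : Int) ^ k) = ((2 ^ k : Nat) : Int) by push_cast; ring]
    exact Int.toNat_natCast _
  rw [ht]
  apply List.map_congr_left
  intro j _
  simp only [Function.comp]
  ring

-- ===== VERDICT (by name: the statement is the Claim_ definition above) =====
theorem getBranchNodes_spec : Claim_equal_getBranchNodes := by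
  intro ind prelayer _
  unfold Spec_getBranchNodes getBranchNodes getBranchNodes_alt
  simp only []
  rw [pvA_loop (ind - 1) (PySem.List.pyRange 0 (prelayer - 1) 1)]
  rw [PySem.List.length_pyRange_one]
  rw [PySem.List.pyRange_one 0 (max prelayer 1), List.foldl_map]
  rw [PySem.List.foldl_append_eq_flatMap]
  rw [List.nil_append]
  have hN : (max prelayer 1 - 0).toNat = (prelayer - 1 - 0).toNat + 1 := by omega
  rw [hN]
  refine List.flatMap_congr ?_
  intro k _
  have hk : ((0 : Int) + (k : Int)).toNat = k := by omega
  simp only [hk]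
  exact (pvB_block ind k).symm
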